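-- pv_equiv track=rewrite | github.com/dominickmacksoud-lgtm/rehab-protocols | generate-protocols.py | extract_wb_initial
-- ===== SOURCE A (Python) =====
-- def extract_wb_initial(wb_text):
--     if not wb_text:
--         return ''
--     text = wb_text.upper()
--     positions = {}
--     for status in ['NWB', 'TDWB', 'PWB', 'WBAT', 'FWB']:
--         idx = text.find(status)
--         if idx >= 0:
--             positions[status] = idx
--     if not positions:
--         return ''
--     return min(positions, key=positions.get)
-- ===== SOURCE B (Python) =====
-- def extract_wb_initial(wb_text):
--     text = wb_text.upper()
--     for i in range(len(text)):
--         for code in ('NWB', 'TDWB', 'PWB', 'WBAT', 'FWB'):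
--             if text.startswith(code, i):
--                 return code
--     return ''
-- ===== Notes on version B (the rewrite author's own statement) =====
-- stated objective: alternative
-- what changed: Replaces five separate text.find scans collected in a dict plus min-by-position with a single left-to-right scan that returns the first code matching via startswith at the current index (valid because the five codes have pairwise distinct first characters, so the first match is the minimum-position one).
import Mathlib
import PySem

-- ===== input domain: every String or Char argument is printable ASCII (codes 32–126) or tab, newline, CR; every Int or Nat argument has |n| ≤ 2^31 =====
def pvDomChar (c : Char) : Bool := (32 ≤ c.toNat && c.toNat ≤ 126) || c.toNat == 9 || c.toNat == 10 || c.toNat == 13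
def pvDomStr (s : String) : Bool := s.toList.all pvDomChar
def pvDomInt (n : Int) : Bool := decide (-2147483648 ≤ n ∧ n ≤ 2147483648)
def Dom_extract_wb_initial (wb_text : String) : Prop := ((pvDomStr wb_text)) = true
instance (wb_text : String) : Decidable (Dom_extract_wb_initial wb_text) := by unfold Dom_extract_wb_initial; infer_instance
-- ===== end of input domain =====

-- B replaces A's five find scans + dict + min-by-position with one left-to-right scan returning the first code that matches (alternative decomposition, same cost).

-- ===== PORT A =====
def extract_wb_initial (wb_text : String) : String :=
  if wb_text = "" then ""
  else
    let text := PySem.Str.upper wb_text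
    let positions := ["NWB", "TDWB", "PWB", "WBAT", "FWB"].foldl
      (fun (d : PySem.Dict String Int) status =>
        let idx := PySem.Str.find text status
        if 0 ≤ idx then d.insert status idx else d)
      PySem.Dict.empty
    if positions.items = [] then ""
    else (PySem.List.min? positions.keys (fun k => positions.getD k 0)).getD ""

-- ===== PORT B =====
-- one pass over the text (suffix by suffix = index by index); the first matching code wins
def wbScan : List Char → String
  | [] => ""
  | c :: t =>
    match ["NWB", "TDWB", "PWB", "WBAT", "FWB"].find?
        (fun code => PySem.Chars.startswith (c :: t) code.toList) with
    | some code => code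
    | none => wbScan t

def extract_wb_initial_alt (wb_text : String) : String :=
  wbScan (PySem.Chars.upper wb_text.toList)

-- ===== PRECONDITION & SPEC =====
def Spec_extract_wb_initial (wb_text : String) (out : String) : Prop := out = extract_wb_initial_alt wb_text
instance (wb_text : String) (out : String) : Decidable (Spec_extract_wb_initial wb_text out) := by unfold Spec_extract_wb_initial; infer_instance

-- ===== CLAIM (what is proved, stated in full; the proofs are below) =====
def Claim_equal_extract_wb_initial : Prop := ∀ (wb_text : String), Dom_extract_wb_initial wb_text → Spec_extract_wb_initial wb_text (extract_wb_initial wb_text)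

-- ===== LEMMAS AND PROOFS =====

-- the five codes, the list of (code, position) matches, and the minimum-position code
def wbC : List String := ["NWB", "TDWB", "PWB", "WBAT", "FWB"]

def wbPos (L : List Char) : List (String × Int) :=
  (wbC.filter (fun c => 0 ≤ PySem.Chars.find L c.toList)).map
    (fun c => (c, PySem.Chars.find L c.toList))

def wbBest (L : List Char) : String :=
  match PySem.List.min? (wbPos L) (fun p => p.2) with
  | none => ""
  | some p => p.1

lemma head?_of_prefix {sub l : List Char} (h : sub <+: l) (hne : sub ≠ []) :
    l.head? = sub.head? := by
  obtain ⟨t, rfl⟩ := h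
  cases sub with
  | nil => exact absurd rfl hne
  | cons a s => rfl

lemma find_eq_zero_of_prefix {L sub : List Char} (h : sub <+: L) :
    PySem.Chars.find L sub = 0 := by
  have hnn : 0 ≤ PySem.Chars.find L sub := by
    rw [PySem.Chars.find_nonneg_iff]; exact h.isInfix
  obtain ⟨hpre, hmin⟩ := PySem.Chars.find_spec hnn
  by_contra hne
  have hpos : 0 < (PySem.Chars.find L sub).toNat := by omega
  exact hmin 0 hpos (by simpa using h)

lemma find_cons_of_not_prefix {ch : Char} {t sub : List Char}
    (h : ¬ sub <+: (ch :: t)) :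
    PySem.Chars.find (ch :: t) sub =
      if PySem.Chars.find t sub = -1 then -1 else PySem.Chars.find t sub + 1 := by
  by_cases hinf : sub <:+: t
  · have hnn : 0 ≤ PySem.Chars.find t sub := by rw [PySem.Chars.find_nonneg_iff]; exact hinf
    obtain ⟨hpre, hmin⟩ := PySem.Chars.find_spec hnn
    set k := (PySem.Chars.find t sub).toNat with hk
    have hinf' : sub <:+: (ch :: t) := List.infix_cons_iff.mpr (Or.inr hinf)
    have hnn' : 0 ≤ PySem.Chars.find (ch :: t) sub := by
      rw [PySem.Chars.find_nonneg_iff]; exact hinf'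
    obtain ⟨hpre', hmin'⟩ := PySem.Chars.find_spec hnn'
    set j := (PySem.Chars.find (ch :: t) sub).toNat with hj
    have hjne : j ≠ 0 := by
      intro h0
      exact h (by simpa [h0] using hpre')
    have hjk : j - 1 ≥ k := by
      by_contra hlt
      have hdrop : sub <+: t.drop (j - 1) := by
        have hh := hpre'
        rw [show j = (j - 1) + 1 by omega, List.drop_succ_cons] at hh
        exact hh
      exact hmin (j - 1) (by omega) hdrop
    have hjle : j ≤ k + 1 := by
      by_contra hgt
      have hdrop : sub <+: (ch :: t).drop (k + 1) := by simpa using hpre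
      exact hmin' (k + 1) (by omega) hdrop
    have h2 : PySem.Chars.find t sub = (k : Int) := by omega
    rw [h2]
    have hne2 : ((k : Int)) ≠ -1 := by omega
    rw [if_neg hne2]
    omega
  · have h1 : PySem.Chars.find t sub = -1 := by rw [PySem.Chars.find_eq_neg_one_iff]; exact hinf
    have h2 : PySem.Chars.find (ch :: t) sub = -1 := by
      rw [PySem.Chars.find_eq_neg_one_iff]
      intro hinf'
      rcases List.infix_cons_iff.mp hinf' with hp | hi
      · exact h hp
      · exact hinf hi
    simp [h1, h2]

lemma min?_eq_of_strict {α : Type} (xs : List α) (key : α → Int) (p : α)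
    (hp : p ∈ xs) (hmin : ∀ q ∈ xs, q ≠ p → key p < key q) :
    PySem.List.min? xs key = some p := by
  cases hm : PySem.List.min? xs key with
  | none =>
    rw [PySem.List.min?_eq_none_iff] at hm
    subst hm; simp at hp
  | some m =>
    have hmem : m ∈ xs := PySem.List.min?_mem hm
    have hle : key m ≤ key p := PySem.List.min?_isMin hm p hp
    by_cases hmp : m = p
    · rw [hmp]
    · exact absurd hle (not_le.mpr (hmin m hmem hmp))

lemma mem_wbPos {L : List Char} {p : String × Int} (hp : p ∈ wbPos L) :
    p.1 ∈ wbC ∧ p.2 = PySem.Chars.find L p.1.toList ∧ 0 ≤ p.2 := by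
  unfold wbPos at hp
  obtain ⟨c, hc, rfl⟩ := List.mem_map.mp hp
  rw [List.mem_filter] at hc
  refine ⟨hc.1, rfl, by simpa using hc.2⟩

-- positions of distinct codes differ: the five codes have pairwise distinct first characters
lemma wbPos_snd_inj {L : List Char} {p q : String × Int}
    (hp : p ∈ wbPos L) (hq : q ∈ wbPos L) (h2 : p.2 = q.2) : p = q := by
  obtain ⟨hpC, hpv, hpn⟩ := mem_wbPos hp
  obtain ⟨hqC, hqv, hqn⟩ := mem_wbPos hq
  have hppre : p.1.toList <+: L.drop p.2.toNat := by
    have h := (PySem.Chars.find_spec (show 0 ≤ PySem.Chars.find L p.1.toList by omega)).1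
    rw [← hpv] at h
    exact h
  have hqpre : q.1.toList <+: L.drop q.2.toNat := by
    have h := (PySem.Chars.find_spec (show 0 ≤ PySem.Chars.find L q.1.toList by omega)).1
    rw [← hqv] at h
    exact h
  rw [← h2] at hqpre
  have hpne : p.1.toList ≠ [] := by
    have : ∀ c ∈ wbC, c.toList ≠ [] := by decide
    exact this p.1 hpC
  have hqne : q.1.toList ≠ [] := by
    have : ∀ c ∈ wbC, c.toList ≠ [] := by decide
    exact this q.1 hqC
  have hheads : p.1.toList.head? = q.1.toList.head? := by
    rw [← head?_of_prefix hppre hpne, ← head?_of_prefix hqpre hqne]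
  have h1 : p.1 = q.1 := by
    have : ∀ c ∈ wbC, ∀ c' ∈ wbC, c.toList.head? = c'.toList.head? → c = c' := by decide
    exact this p.1 hpC q.1 hqC hheads
  exact Prod.ext h1 h2

lemma wbPos_strict {L : List Char} {m : String × Int}
    (hm : PySem.List.min? (wbPos L) (fun p => p.2) = some m) :
    ∀ q ∈ wbPos L, q ≠ m → m.2 < q.2 := by
  intro q hq hne
  have hle : m.2 ≤ q.2 := PySem.List.min?_isMin hm q hq
  rcases lt_or_eq_of_le hle with h | h
  · exact h
  · exact absurd (wbPos_snd_inj hq (PySem.List.min?_mem hm) h.symm) hne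

lemma wbPos_cons_of_no_prefix {ch : Char} {t : List Char}
    (h : ∀ c ∈ wbC, ¬ c.toList <+: (ch :: t)) :
    wbPos (ch :: t) = (wbPos t).map (fun p => (p.1, p.2 + 1)) := by
  unfold wbPos
  have hshift : ∀ c ∈ wbC, PySem.Chars.find (ch :: t) c.toList =
      (if PySem.Chars.find t c.toList = -1 then -1 else PySem.Chars.find t c.toList + 1) :=
    fun c hc => find_cons_of_not_prefix (h c hc)
  rw [List.map_map]
  have hfilter : (wbC.filter (fun c => decide (0 ≤ PySem.Chars.find (ch :: t) c.toList))) =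
      (wbC.filter (fun c => decide (0 ≤ PySem.Chars.find t c.toList))) := by
    apply List.filter_congr
    intro c hc
    have hge : -1 ≤ PySem.Chars.find t c.toList := PySem.Chars.neg_one_le_find t c.toList
    rw [hshift c hc]
    by_cases h1 : PySem.Chars.find t c.toList = -1
    · simp [h1]
    · rw [if_neg h1]
      have hx : (0 ≤ PySem.Chars.find t c.toList + 1) := by omega
      have hy : (0 ≤ PySem.Chars.find t c.toList) := by omega
      simp [hx, hy]
  rw [hfilter]
  apply List.map_congr_left
  intro c hc
  rw [List.mem_filter] at hc
  have hnn : 0 ≤ PySem.Chars.find t c.toList := by simpa using hc.2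
  have h1 : PySem.Chars.find t c.toList ≠ -1 := by omega
  simp only [Function.comp_apply]
  rw [hshift c hc.1, if_neg h1]

lemma wbScan_eq_wbBest (L : List Char) : wbScan L = wbBest L := by
  induction L with
  | nil => rfl
  | cons ch t ih =>
    cases hf : (["NWB", "TDWB", "PWB", "WBAT", "FWB"].find?
        (fun code => PySem.Chars.startswith (ch :: t) code.toList)) with
    | some c0 =>
      have hscan : wbScan (ch :: t) = c0 := by rw [wbScan, hf]
      have hc0mem : c0 ∈ wbC := List.mem_of_find?_eq_some hf
      have hpred := List.find?_some (p := fun code : String => PySem.Chars.startswith (ch :: t) code.toList) hf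
      have hc0pre : c0.toList <+: (ch :: t) :=
        (PySem.Chars.startswith_iff _ _).mp hpred
      have hfind0 : PySem.Chars.find (ch :: t) c0.toList = 0 := find_eq_zero_of_prefix hc0pre
      have hpmem : (c0, PySem.Chars.find (ch :: t) c0.toList) ∈ wbPos (ch :: t) := by
        unfold wbPos
        apply List.mem_map.mpr
        refine ⟨c0, List.mem_filter.mpr ⟨hc0mem, by simp [hfind0]⟩, rfl⟩
      have hstrict : ∀ q ∈ wbPos (ch :: t), q ≠ (c0, PySem.Chars.find (ch :: t) c0.toList) →
          (c0, PySem.Chars.find (ch :: t) c0.toList).2 < q.2 := by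
        intro q hq hne
        obtain ⟨_, _, hqn⟩ := mem_wbPos hq
        have : q.2 ≠ (c0, PySem.Chars.find (ch :: t) c0.toList).2 := by
          intro he
          exact hne (wbPos_snd_inj hq hpmem he)
        simp only [hfind0] at this ⊢
        omega
      have hmin := min?_eq_of_strict (wbPos (ch :: t)) (fun p => p.2) _ hpmem hstrict
      rw [hscan]
      unfold wbBest
      rw [hmin]
    | none =>
      have hscan : wbScan (ch :: t) = wbScan t := by rw [wbScan, hf]
      have hnp : ∀ c ∈ wbC, ¬ c.toList <+: (ch :: t) := by
        intro c hc hpre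
        have hnone := List.find?_eq_none.mp hf c hc
        exact hnone ((PySem.Chars.startswith_iff _ _).mpr hpre)
      have hps := wbPos_cons_of_no_prefix hnp
      rw [hscan, ih]
      unfold wbBest
      rw [hps]
      cases hm : PySem.List.min? (wbPos t) (fun p => p.2) with
      | none =>
        rw [PySem.List.min?_eq_none_iff] at hm
        have hz : PySem.List.min? ([] : List (String × Int)) (fun p => p.2) = none := by
          rw [PySem.List.min?_eq_none_iff]
        rw [hm, List.map_nil, hz]
      | some m =>
        have hmem : (m.1, m.2 + 1) ∈ (wbPos t).map (fun p => (p.1, p.2 + 1)) :=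
          List.mem_map.mpr ⟨m, PySem.List.min?_mem hm, rfl⟩
        have hstrict : ∀ q ∈ (wbPos t).map (fun p => (p.1, p.2 + 1)),
            q ≠ (m.1, m.2 + 1) → (m.1, m.2 + 1).2 < q.2 := by
          intro q hq hne
          obtain ⟨q0, hq0, rfl⟩ := List.mem_map.mp hq
          have hq0ne : q0 ≠ m := by
            intro he; exact hne (by rw [he])
          have := wbPos_strict hm q0 hq0 hq0ne
          simp only []
          omega
        rw [min?_eq_of_strict _ _ _ hmem hstrict]

lemma items_condfold (L : List Char) (cs : List String) (d : PySem.Dict String Int)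
    (hfresh : ∀ c ∈ cs, d.contains c = false) (hnd : cs.Nodup) :
    (cs.foldl (fun d c => if 0 ≤ PySem.Chars.find L c.toList
        then d.insert c (PySem.Chars.find L c.toList) else d) d).items
      = d.items ++ (cs.filter (fun c => 0 ≤ PySem.Chars.find L c.toList)).map
          (fun c => (c, PySem.Chars.find L c.toList)) := by
  induction cs generalizing d with
  | nil => simp
  | cons c cs ih =>
    rw [List.foldl_cons]
    by_cases hc : 0 ≤ PySem.Chars.find L c.toList
    · rw [if_pos hc]
      have hfresh' : ∀ c' ∈ cs, (d.insert c (PySem.Chars.find L c.toList)).contains c' = false := by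
        intro c' hc'
        rw [PySem.Dict.contains_insert]
        have hne : c' ≠ c := by rintro rfl; exact (List.nodup_cons.mp hnd).1 hc'
        simp [hne, hfresh c' (List.mem_cons_of_mem _ hc')]
      rw [ih _ hfresh' (List.nodup_cons.mp hnd).2,
        PySem.Dict.items_insert_of_not_contains d _ (hfresh c List.mem_cons_self),
        List.filter_cons_of_pos (by simpa using hc), List.map_cons]
      simp
    · rw [if_neg hc,
        ih _ (fun c' hc' => hfresh c' (List.mem_cons_of_mem _ hc')) (List.nodup_cons.mp hnd).2,
        List.filter_cons_of_neg (by simpa using hc)]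

lemma keys_fst_nodup (L : List Char) : ((wbPos L).map Prod.fst).Nodup := by
  unfold wbPos
  rw [List.map_map]
  have : (Prod.fst ∘ fun c : String => (c, PySem.Chars.find L c.toList)) = id := rfl
  rw [this, List.map_id]
  exact List.Nodup.filter _ (by decide : wbC.Nodup)

lemma extract_eq_wbBest (wb_text : String) (h : wb_text ≠ "") :
    extract_wb_initial wb_text = wbBest (PySem.Chars.upper wb_text.toList) := by
  unfold extract_wb_initial
  rw [if_neg h]
  have hfind : ∀ c : String, PySem.Str.find (PySem.Str.upper wb_text) c =
      PySem.Chars.find (PySem.Chars.upper wb_text.toList) c.toList := by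
    intro c; simp
  simp only [hfind]
  set L := PySem.Chars.upper wb_text.toList with hL
  have hitems : (["NWB", "TDWB", "PWB", "WBAT", "FWB"].foldl
      (fun (d : PySem.Dict String Int) status =>
        if 0 ≤ PySem.Chars.find L status.toList
        then d.insert status (PySem.Chars.find L status.toList) else d)
      PySem.Dict.empty).items = wbPos L := by
    rw [items_condfold L (["NWB", "TDWB", "PWB", "WBAT", "FWB"]) PySem.Dict.empty
      (fun c _ => by simp [PySem.Dict.contains_empty]) (by decide)]
    rfl
  set d0 := (["NWB", "TDWB", "PWB", "WBAT", "FWB"].foldl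
      (fun (d : PySem.Dict String Int) status =>
        if 0 ≤ PySem.Chars.find L status.toList
        then d.insert status (PySem.Chars.find L status.toList) else d)
      PySem.Dict.empty) with hd0
  have hkeys : d0.keys = (wbPos L).map Prod.fst := by
    show d0.items.map Prod.fst = (wbPos L).map Prod.fst
    rw [hitems]
  have hkeysnd : d0.keys.Nodup := by rw [hkeys]; exact keys_fst_nodup L
  have hgetD : ∀ q ∈ wbPos L, d0.getD q.1 0 = q.2 := by
    intro q hq
    exact PySem.Dict.getD_of_mem_items d0 (by rw [hitems]; simpa using hq) hkeysnd 0
  by_cases hps : wbPos L = []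
  · rw [if_pos (by rw [hitems, hps])]
    unfold wbBest
    rw [hps]
    have hz : PySem.List.min? ([] : List (String × Int)) (fun p => p.2) = none := by
      rw [PySem.List.min?_eq_none_iff]
    rw [hz]
  · rw [if_neg (by rw [hitems]; exact hps)]
    cases hm : PySem.List.min? (wbPos L) (fun p => p.2) with
    | none => rw [PySem.List.min?_eq_none_iff] at hm; exact absurd hm hps
    | some m =>
      have hstrict := wbPos_strict hm
      have hmem1 : m.1 ∈ d0.keys := by
        rw [hkeys]; exact List.mem_map.mpr ⟨m, PySem.List.min?_mem hm, rfl⟩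
      have hstrict1 : ∀ k ∈ d0.keys, k ≠ m.1 → d0.getD m.1 0 < d0.getD k 0 := by
        intro k hk hne
        rw [hkeys] at hk
        obtain ⟨q, hq, rfl⟩ := List.mem_map.mp hk
        have hqm : q ≠ m := fun he => hne (by rw [he])
        rw [hgetD q hq, hgetD m (PySem.List.min?_mem hm)]
        exact hstrict q hq hqm
      rw [min?_eq_of_strict d0.keys (fun k => d0.getD k 0) m.1 hmem1
        (fun k hk hne => hstrict1 k hk hne)]
      unfold wbBest
      rw [hm]
      rfl

-- ===== VERDICT (by name: the statement is the Claim_ definition above) =====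
theorem extract_wb_initial_spec : Claim_equal_extract_wb_initial := by
  intro wb_text _
  unfold Spec_extract_wb_initial extract_wb_initial_alt
  rw [wbScan_eq_wbBest]
  by_cases h : wb_text = ""
  · subst h; decide
  · exact extract_eq_wbBest wb_text h
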